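-- pv_equiv track=rewrite | github.com/kavyasantha22/async-trivia-game | answer.py | _parse_ip_cidr
-- ===== SOURCE A (Python) =====
-- def _parse_ip_cidr(short_question: str):
--     ip = 0x0
--     cidr = 0
--     cur = ""
--
--     for char in short_question:
--         if char == '.' or char == '/':
--             ip = ip << 8 | int(cur)
--             cur = ""
--         else:
--             cur += char
--     cidr = int(cur)
--
--     return (ip, cidr)
-- ===== SOURCE B (Python) =====
-- def _parse_ip_cidr(short_question: str):
--     segments = short_question.replace('/', '.').split('.')
--     ip = 0
--     for seg in segments[:-1]:
--         ip = ip << 8 | int(seg)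
--     return (ip, int(segments[-1]))
-- ===== Notes on version B (the rewrite author's own statement) =====
-- stated objective: idiomatic
-- what changed: Tokenizes the whole string first (replace '/' with '.' then split on '.') and folds the segments, instead of A's character-by-character scan with a mutable accumulator string.
import Mathlib
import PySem

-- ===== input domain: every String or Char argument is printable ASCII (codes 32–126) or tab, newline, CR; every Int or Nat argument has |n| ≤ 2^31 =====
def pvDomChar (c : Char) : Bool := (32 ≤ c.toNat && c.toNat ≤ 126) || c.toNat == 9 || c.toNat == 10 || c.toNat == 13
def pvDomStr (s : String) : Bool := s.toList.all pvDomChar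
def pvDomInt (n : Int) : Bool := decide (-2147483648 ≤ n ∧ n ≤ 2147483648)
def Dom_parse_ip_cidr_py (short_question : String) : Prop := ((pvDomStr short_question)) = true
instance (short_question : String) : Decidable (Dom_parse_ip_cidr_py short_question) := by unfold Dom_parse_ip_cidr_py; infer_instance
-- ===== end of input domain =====

-- B tokenizes the whole string first (replace '/' with '.', split on '.') and folds the
-- segment list, instead of A's character-by-character scan with a mutable accumulator string;
-- objective: idiomatic, same cost.

-- ===== PORT A =====
-- literal port of A's scan: state (ip, cur); int(cur) is PySem.Int.ofChars?
-- (where Python raises ValueError the port uses .getD 0; those inputs are outside Pre_).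
def parse_ip_cidr_py (short_question : String) : Int × Int :=
  let fin := short_question.toList.foldl
    (fun (st : Int × List Char) (char : Char) =>
      if char = '.' ∨ char = '/' then
        (PySem.Int.bor (st.1 <<< 8) ((PySem.Int.ofChars? st.2).getD 0), ([] : List Char))
      else
        (st.1, st.2 ++ [char]))
    (0, [])
  (fin.1, (PySem.Int.ofChars? fin.2).getD 0)

-- ===== PORT B =====
-- literal port of Source B: replace '/' by '.', split on '.', fold segments[:-1], parse segments[-1]
def parse_ip_cidr_py_alt (short_question : String) : Int × Int :=
  let segments := PySem.Chars.splitOn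
    (PySem.Chars.replace short_question.toList ['/'] ['.']) ['.']
  let ip := segments.dropLast.foldl
    (fun ip seg => PySem.Int.bor (ip <<< 8) ((PySem.Int.ofChars? seg).getD 0)) 0
  (ip, (PySem.Int.ofChars? ((segments.getLast?).getD [])).getD 0)

-- ===== PRECONDITION & SPEC =====
-- the '.'- or '/'-separated segments of the input (first segment, remaining segments)
def pvSegsBy (isSep : Char → Bool) : List Char → List Char × List (List Char)
  | [] => ([], [])
  | c :: cs =>
    let p := pvSegsBy isSep cs
    if isSep c then ([], p.1 :: p.2) else (c :: p.1, p.2)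

-- Pre_: every '.'- or '/'-separated segment of the string is a valid Python int literal
-- (exactly where A's int(cur) calls all succeed; elsewhere Python A raises ValueError).
def Pre_parse_ip_cidr_py (short_question : String) : Prop :=
  ∀ seg ∈ (pvSegsBy (fun c => c == '.' || c == '/') short_question.toList).1 ::
          (pvSegsBy (fun c => c == '.' || c == '/') short_question.toList).2,
    (PySem.Int.ofChars? seg).isSome = true
instance (short_question : String) : Decidable (Pre_parse_ip_cidr_py short_question) := by
  unfold Pre_parse_ip_cidr_py; infer_instance

def pvWitness_parse_ip_cidr_py : String := "1.2.3.4/24"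

def Spec_parse_ip_cidr_py (short_question : String) (out : Int × Int) : Prop := out = parse_ip_cidr_py_alt short_question
instance (short_question : String) (out : Int × Int) : Decidable (Spec_parse_ip_cidr_py short_question out) := by unfold Spec_parse_ip_cidr_py; infer_instance

-- ===== CLAIM (what is proved, stated in full; the proofs are below) =====
def Claim_equal_parse_ip_cidr_py : Prop := ∀ (short_question : String), Dom_parse_ip_cidr_py short_question → Pre_parse_ip_cidr_py short_question → Spec_parse_ip_cidr_py short_question (parse_ip_cidr_py short_question)

-- ===== LEMMAS AND PROOFS =====

def pvSub (c : Char) : Char := if c = '/' then '.' else c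

theorem pv_replace_go (l : List Char) : ∀ (fuel : Nat) (acc : List Char), l.length ≤ fuel →
    PySem.Chars.replace.go ['/'] ['.'] fuel l acc = acc.reverse ++ l.map pvSub := by
  induction l with
  | nil =>
    intro fuel acc _
    cases fuel <;> simp [PySem.Chars.replace.go]
  | cons c t ih =>
    intro fuel acc hle
    cases fuel with
    | zero => simp at hle
    | succ f =>
      have hlt : t.length ≤ f := by simpa using hle
      by_cases hc : c = '/'
      · subst hc
        simp [PySem.Chars.replace.go, List.isPrefixOf, ih f ('.' :: acc) hlt, pvSub]
      · simp [PySem.Chars.replace.go, List.isPrefixOf, hc, Ne.symm hc,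
          ih f (c :: acc) hlt, pvSub]

theorem pv_replace_eq (l : List Char) :
    PySem.Chars.replace l ['/'] ['.'] = l.map pvSub := by
  simp [PySem.Chars.replace, pv_replace_go l l.length [] (le_refl _)]

theorem pv_split_go (l : List Char) : ∀ (fuel : Nat) (cur : List Char) (acc : List (List Char)),
    l.length ≤ fuel →
    PySem.Chars.splitOn.go ['.'] fuel l cur acc =
      acc.reverse ++ (cur.reverse ++ (pvSegsBy (fun c => c == '.') l).1) ::
        (pvSegsBy (fun c => c == '.') l).2 := by
  induction l with
  | nil =>
    intro fuel cur acc _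
    cases fuel <;> simp [PySem.Chars.splitOn.go, pvSegsBy]
  | cons c t ih =>
    intro fuel cur acc hle
    cases fuel with
    | zero => simp at hle
    | succ f =>
      have hlt : t.length ≤ f := by simpa using hle
      by_cases hc : c = '.'
      · subst hc
        simp [PySem.Chars.splitOn.go, List.isPrefixOf, ih f [] (cur.reverse :: acc) hlt, pvSegsBy]
      · simp [PySem.Chars.splitOn.go, List.isPrefixOf, hc, Ne.symm hc,
          ih f (c :: cur) acc hlt, pvSegsBy]

theorem pv_segs_map (l : List Char) :
    pvSegsBy (fun c => c == '.') (l.map pvSub) =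
      pvSegsBy (fun c => c == '.' || c == '/') l := by
  induction l with
  | nil => simp [pvSegsBy]
  | cons c t ih =>
    by_cases hc : c = '/'
    · subst hc; simp [pvSegsBy, pvSub, ih]
    · by_cases hd : c = '.'
      · subst hd; simp [pvSegsBy, pvSub, ih]
      · simp [pvSegsBy, pvSub, hc, hd, ih]

theorem pv_split_eq (l : List Char) :
    PySem.Chars.splitOn (PySem.Chars.replace l ['/'] ['.']) ['.'] =
      (pvSegsBy (fun c => c == '.' || c == '/') l).1 ::
        (pvSegsBy (fun c => c == '.' || c == '/') l).2 := by
  rw [pv_replace_eq]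
  unfold PySem.Chars.splitOn
  rw [pv_split_go _ _ [] [] (by simp)]
  simp [pv_segs_map]

-- A's scan, run from any state (ip, cur), folds the segments (with cur prefixed to the first)
theorem pv_scan_eq (l : List Char) : ∀ (ip : Int) (cur : List Char),
    l.foldl
      (fun (st : Int × List Char) (char : Char) =>
        if char = '.' ∨ char = '/' then
          (PySem.Int.bor (st.1 <<< 8) ((PySem.Int.ofChars? st.2).getD 0), ([] : List Char))
        else
          (st.1, st.2 ++ [char]))
      (ip, cur) =
    ( (((cur ++ (pvSegsBy (fun c => c == '.' || c == '/') l).1) ::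
        (pvSegsBy (fun c => c == '.' || c == '/') l).2).dropLast).foldl
        (fun ip seg => PySem.Int.bor (ip <<< 8) ((PySem.Int.ofChars? seg).getD 0)) ip,
      (((cur ++ (pvSegsBy (fun c => c == '.' || c == '/') l).1) ::
        (pvSegsBy (fun c => c == '.' || c == '/') l).2).getLast?).getD [] ) := by
  induction l with
  | nil => intro ip cur; simp [pvSegsBy]
  | cons c t ih =>
    intro ip cur
    by_cases hc : c = '.' ∨ c = '/'
    · have hsep : ((c == '.' || c == '/') : Bool) = true := by
        rcases hc with h | h <;> simp [h]
      simp only [List.foldl_cons, if_pos hc]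
      rw [ih]
      rcases h : pvSegsBy (fun c => c == '.' || c == '/') t with ⟨sh, st⟩
      simp [pvSegsBy, hsep, h]
    · have hsep : ((c == '.' || c == '/') : Bool) = false := by
        push Not at hc; simp [hc.1, hc.2]
      simp only [List.foldl_cons, if_neg hc]
      rw [ih]
      rcases h : pvSegsBy (fun c => c == '.' || c == '/') t with ⟨sh, st⟩
      simp [pvSegsBy, hsep, h]

-- ===== VERDICT (by name: the statement is the Claim_ definition above) =====
theorem parse_ip_cidr_py_spec : Claim_equal_parse_ip_cidr_py := by
  intro s _ _
  unfold Spec_parse_ip_cidr_py parse_ip_cidr_py parse_ip_cidr_py_alt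
  rw [pv_split_eq, pv_scan_eq]
  simp
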